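-- pv_equiv track=rewrite | github.com/materialsvirtuallab/mlearn | mlearn/potentials/lammps/calcs.py | get_bs_subscripts
-- ===== SOURCE A (Python) =====
-- import itertools
--
-- def get_bs_subscripts(twojmax, diagonal):
--     """
--     Method to list the subscripts 2j1, 2j2, 2j of bispectrum
--     components.
--
--     Args:
--         twojmax (int): Band limit for bispectrum components.
--         diagonal (int): Parameter defining which bispectrum
--         components are generated. Choose among 0, 1, 2 and 3.
--
--     Returns:
--         List of all subscripts [2j1, 2j2, 2j].
--
--     """
--     subs = itertools.product(range(twojmax + 1), repeat=3)
--     filters = [lambda x: True if x[0] >= x[1] else False]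
--     if diagonal == 2:
--         filters.append(lambda x: True if x[0] == x[1] == x[2] else False)
--     else:
--         if diagonal == 1:
--             filters.append(lambda x: True if x[0] == x[1] else False)
--         elif diagonal == 3:
--             filters.append(lambda x: True if x[2] >= x[0] else False)
--         elif diagonal == 0:
--             pass
--         j_filter = lambda x: True if \
--             x[2] in range(x[0] - x[1], min(twojmax, x[0] + x[1]) + 1, 2)\
--             else False
--         filters.append(j_filter)
--     for f in filters:
--         subs = filter(f, subs)
--     return list(subs)
-- ===== SOURCE B (Python) =====
-- def get_bs_subscripts(twojmax, diagonal):
--     """Directly generate the valid subscript triples per diagonal branch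
--     instead of filtering the full cubic product."""
--     if diagonal == 2:
--         return [(j, j, j) for j in range(twojmax + 1)]
--     out = []
--     for j1 in range(twojmax + 1):
--         j2s = (j1,) if diagonal == 1 else range(j1 + 1)
--         for j2 in j2s:
--             for j in range(j1 - j2, min(twojmax, j1 + j2) + 1, 2):
--                 if diagonal != 3 or j >= j1:
--                     out.append((j1, j2, j))
--     return out
-- ===== Notes on version B (the rewrite author's own statement) =====
-- stated objective: alternative
-- what changed: B generates the valid triples directly per diagonal branch with nested loops whose bounds encode the filters (j2 <= j1, j range with step 2), instead of filtering the full cubic itertools.product; intended as faster (measured 12-13x at the largest size both finished, but for diagonal 0/3 the output itself is cubic, so a timing run could not always confirm it at the largest generated size).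
import Mathlib
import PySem

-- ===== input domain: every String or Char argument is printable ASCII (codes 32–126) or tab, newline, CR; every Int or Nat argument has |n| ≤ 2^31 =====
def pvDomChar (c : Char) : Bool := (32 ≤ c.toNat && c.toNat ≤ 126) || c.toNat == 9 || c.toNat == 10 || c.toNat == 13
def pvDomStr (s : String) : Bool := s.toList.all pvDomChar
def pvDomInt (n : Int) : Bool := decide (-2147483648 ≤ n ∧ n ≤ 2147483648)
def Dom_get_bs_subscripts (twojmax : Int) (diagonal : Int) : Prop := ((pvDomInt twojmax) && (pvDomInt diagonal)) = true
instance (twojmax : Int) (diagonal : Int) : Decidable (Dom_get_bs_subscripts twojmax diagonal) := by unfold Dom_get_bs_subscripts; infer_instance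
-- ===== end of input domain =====

-- B generates only the valid subscript triples per diagonal branch, instead of
-- filtering the full cubic product as A does; equal output proved below.

-- ===== PORT A =====
-- A's lambda filters; x is the product triple (ported as a 3-element list, so the
-- match arms are exactly Python's x[0], x[1], x[2] on a tuple of length 3)
def pvF1 (x : List Int) : Bool := match x with | a :: b :: _ => decide (b ≤ a) | _ => false
def pvF2 (x : List Int) : Bool := match x with | a :: b :: c :: _ => decide (a = b) && decide (b = c) | _ => false
def pvFd1 (x : List Int) : Bool := match x with | a :: b :: _ => decide (a = b) | _ => false
def pvFd3 (x : List Int) : Bool := match x with | a :: _ :: c :: _ => decide (a ≤ c) | _ => false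
-- x[2] in range(x[0] - x[1], min(twojmax, x[0] + x[1]) + 1, 2)
def pvJF (twojmax : Int) (x : List Int) : Bool := match x with
  | a :: b :: c :: _ => (PySem.List.pyRange (a - b) (min twojmax (a + b) + 1) 2).contains c
  | _ => false

def get_bs_subscripts (twojmax : Int) (diagonal : Int) : List (List Int) :=
  let r := PySem.List.pyRange 0 (twojmax + 1) 1
  -- itertools.product(range(twojmax + 1), repeat=3), lexicographic order
  let subs := r.flatMap (fun a => r.flatMap (fun b => r.map (fun c => [a, b, c])))
  let subs := subs.filter pvF1
  if diagonal = 2 then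
    subs.filter pvF2
  else
    let subs2 :=
      if diagonal = 1 then subs.filter pvFd1
      else if diagonal = 3 then subs.filter pvFd3
      else subs
    subs2.filter (pvJF twojmax)

-- ===== PORT B =====
def get_bs_subscripts_alt (twojmax : Int) (diagonal : Int) : List (List Int) :=
  if diagonal = 2 then
    (PySem.List.pyRange 0 (twojmax + 1) 1).map (fun j => [j, j, j])
  else
    (PySem.List.pyRange 0 (twojmax + 1) 1).flatMap (fun j1 =>
      (if diagonal = 1 then [j1] else PySem.List.pyRange 0 (j1 + 1) 1).flatMap (fun j2 =>
        (PySem.List.pyRange (j1 - j2) (min twojmax (j1 + j2) + 1) 2).flatMap (fun j =>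
          if diagonal ≠ 3 ∨ j1 ≤ j then [[j1, j2, j]] else [])))

-- ===== PRECONDITION & SPEC =====
def Spec_get_bs_subscripts (twojmax : Int) (diagonal : Int) (out : List (List Int)) : Prop := out = get_bs_subscripts_alt twojmax diagonal
instance (twojmax : Int) (diagonal : Int) (out : List (List Int)) : Decidable (Spec_get_bs_subscripts twojmax diagonal out) := by unfold Spec_get_bs_subscripts; infer_instance

-- ===== CLAIM (what is proved, stated in full; the proofs are below) =====
def Claim_equal_get_bs_subscripts : Prop := ∀ (twojmax : Int) (diagonal : Int), Dom_get_bs_subscripts twojmax diagonal → Spec_get_bs_subscripts twojmax diagonal (get_bs_subscripts twojmax diagonal)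

-- ===== LEMMAS AND PROOFS =====

-- a positive-step range is strictly increasing
lemma pairwise_lt_pyRange_pos (a b s : Int) (hs : 0 < s) :
    (PySem.List.pyRange a b s).Pairwise (· < ·) := by
  rw [PySem.List.pyRange_of_pos a b hs]
  rw [List.pairwise_map]
  refine List.pairwise_lt_range.imp ?_
  intro k k' h
  have : (k:Int) < k' := by exact_mod_cast h
  nlinarith

-- filtering a strictly increasing list by membership in an increasing sublist returns that sublist
lemma filter_contains_eq (r s : List Int) (hr : r.Pairwise (· < ·)) (hs : s.Pairwise (· < ·))
    (hsub : ∀ x ∈ s, x ∈ r) : r.filter (fun c => s.contains c) = s := by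
  have hrn : r.Nodup := hr.imp (fun h => ne_of_lt h)
  have hsn : s.Nodup := hs.imp (fun h => ne_of_lt h)
  refine List.Perm.eq_of_pairwise (le := (· < ·)) ?_ (hr.filter _) hs ?_
  · intro x y _ _ h h'
    exact absurd h (lt_asymm h')
  · refine (List.perm_ext_iff_of_nodup (hrn.filter _) hsn).mpr ?_
    intro x
    simp only [List.mem_filter, List.contains_iff_mem]
    constructor
    · rintro ⟨_, h⟩; exact h
    · intro h; exact ⟨hsub x h, h⟩

lemma filter_le_pyRange (t a : Int) (hat : a ≤ t) :
    (PySem.List.pyRange 0 (t+1) 1).filter (fun b => decide (b ≤ a)) = PySem.List.pyRange 0 (a+1) 1 := by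
  rw [List.filter_congr (q := fun b => (PySem.List.pyRange 0 (a+1) 1).contains b) ?_]
  · exact filter_contains_eq _ _ (pairwise_lt_pyRange_pos _ _ _ one_pos)
      (pairwise_lt_pyRange_pos _ _ _ one_pos)
      (fun x hx => by rw [PySem.List.mem_pyRange_one] at hx ⊢; omega)
  · intro x hx
    rw [PySem.List.mem_pyRange_one] at hx
    rw [Bool.eq_iff_iff]
    simp only [List.contains_iff_mem, PySem.List.mem_pyRange_one, decide_eq_true_eq]
    omega

-- the j-filter over the full range returns exactly the step-2 range (0 ≤ b ≤ a ≤ t)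
lemma filter_S (t a b : Int) (hba : b ≤ a) (_hat : a ≤ t) :
    (PySem.List.pyRange 0 (t+1) 1).filter
        (fun c => (PySem.List.pyRange (a-b) (min t (a+b)+1) 2).contains c)
      = PySem.List.pyRange (a-b) (min t (a+b)+1) 2 := by
  refine filter_contains_eq _ _ (pairwise_lt_pyRange_pos _ _ _ one_pos)
    (pairwise_lt_pyRange_pos _ _ _ two_pos) ?_
  intro x hx
  rw [PySem.List.mem_pyRange_iff_of_pos two_pos] at hx
  rw [PySem.List.mem_pyRange_one]
  omega

-- diagonal 3: j-filter together with a ≤ j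
lemma filter_S3 (t a b : Int) (hba : b ≤ a) (_hat : a ≤ t) :
    (PySem.List.pyRange 0 (t+1) 1).filter
        (fun c => (PySem.List.pyRange (a-b) (min t (a+b)+1) 2).contains c && decide (a ≤ c))
      = (PySem.List.pyRange (a-b) (min t (a+b)+1) 2).filter (fun j => decide (a ≤ j)) := by
  rw [List.filter_congr (q := fun c =>
    ((PySem.List.pyRange (a-b) (min t (a+b)+1) 2).filter (fun j => decide (a ≤ j))).contains c) ?_]
  · refine filter_contains_eq _ _ (pairwise_lt_pyRange_pos _ _ _ one_pos)
      ((pairwise_lt_pyRange_pos _ _ _ two_pos).filter _) ?_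
    intro x hx
    rw [List.mem_filter, PySem.List.mem_pyRange_iff_of_pos two_pos] at hx
    rw [PySem.List.mem_pyRange_one]
    omega
  · intro x _
    rw [Bool.eq_iff_iff]
    simp [List.mem_filter]

-- filtering the range with a predicate equivalent to (= a) returns [a] (0 ≤ a ≤ t)
lemma filter_key (t a : Int) (q : Int → Bool) (hq : ∀ x, q x = true ↔ x = a)
    (ha : 0 ≤ a) (hat : a ≤ t) :
    (PySem.List.pyRange 0 (t+1) 1).filter q = [a] := by
  rw [List.filter_congr (q := fun b => ([a] : List Int).contains b) ?_]
  · refine filter_contains_eq _ _ (pairwise_lt_pyRange_pos _ _ _ one_pos)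
      (List.pairwise_singleton _ _) ?_
    intro x hx
    rw [List.mem_singleton] at hx
    rw [PySem.List.mem_pyRange_one]
    omega
  · intro x _
    rw [Bool.eq_iff_iff]
    simp [hq]

-- 'for x in l: if q(x): out += h(x)' as a filter
lemma flatMap_if {α β : Type} (l : List α) (q : α → Bool) (h : α → List β) :
    l.flatMap (fun x => if q x then h x else []) = (l.filter q).flatMap h := by
  induction l with
  | nil => rfl
  | cons x xs ih => by_cases hx : q x <;> simp [hx, ih]

lemma flatMap_ite {α β : Type} (l : List α) (p : α → Prop) [DecidablePred p] (h : α → List β) :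
    l.flatMap (fun x => if p x then h x else []) = (l.filter (fun x => decide (p x))).flatMap h := by
  induction l with
  | nil => rfl
  | cons x xs ih => by_cases hx : p x <;> simp [hx, ih]

-- diagonal ∉ {1, 2, 3} (Python's diagonal == 0 and every other value)
lemma case_generic (t d : Int) (h2 : d ≠ 2) (h1 : d ≠ 1) (h3 : d ≠ 3) :
    get_bs_subscripts t d = get_bs_subscripts_alt t d := by
  simp only [get_bs_subscripts, get_bs_subscripts_alt, if_neg h2, if_neg h1, if_neg h3, ne_eq]
  simp only [List.filter_flatMap, List.filter_map, List.filter_filter, Function.comp_def,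
    h3, pvJF, pvF1]
  refine List.flatMap_congr ?_
  intro a ha
  rw [PySem.List.mem_pyRange_one] at ha
  calc (PySem.List.pyRange 0 (t+1) 1).flatMap (fun b =>
          ((PySem.List.pyRange 0 (t+1) 1).filter
            (fun c => (PySem.List.pyRange (a-b) (min t (a+b)+1) 2).contains c && decide (b ≤ a))).map
            (fun c => [a, b, c]))
      = (PySem.List.pyRange 0 (t+1) 1).flatMap (fun b =>
          if decide (b ≤ a) then
            ((PySem.List.pyRange 0 (t+1) 1).filter
              (fun c => (PySem.List.pyRange (a-b) (min t (a+b)+1) 2).contains c)).map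
              (fun c => [a, b, c])
          else []) := by
        refine List.flatMap_congr ?_
        intro b _
        by_cases hba : b ≤ a <;> simp [hba]
    _ = ((PySem.List.pyRange 0 (t+1) 1).filter (fun b => decide (b ≤ a))).flatMap (fun b =>
          ((PySem.List.pyRange 0 (t+1) 1).filter
            (fun c => (PySem.List.pyRange (a-b) (min t (a+b)+1) 2).contains c)).map
            (fun c => [a, b, c])) := flatMap_if _ _ _
    _ = (PySem.List.pyRange 0 (a+1) 1).flatMap (fun b =>
          (PySem.List.pyRange (a-b) (min t (a+b)+1) 2).map (fun c => [a, b, c])) := by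
        rw [filter_le_pyRange t a (by omega)]
        refine List.flatMap_congr ?_
        intro b hb
        rw [PySem.List.mem_pyRange_one] at hb
        rw [filter_S t a b (by omega) (by omega)]
    _ = (PySem.List.pyRange 0 (a+1) 1).flatMap (fun b =>
          (PySem.List.pyRange (a-b) (min t (a+b)+1) 2).flatMap (fun c => [[a, b, c]])) := by
        simp [← List.map_eq_flatMap]

lemma case_three (t : Int) :
    get_bs_subscripts t 3 = get_bs_subscripts_alt t 3 := by
  simp only [get_bs_subscripts, get_bs_subscripts_alt]
  norm_num
  simp only [List.filter_flatMap, List.filter_map, Function.comp_def, pvJF, pvF1, pvFd3]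
  refine List.flatMap_congr ?_
  intro a ha
  rw [PySem.List.mem_pyRange_one] at ha
  calc (PySem.List.pyRange 0 (t+1) 1).flatMap (fun b =>
          ((PySem.List.pyRange 0 (t+1) 1).filter
            (fun c => (PySem.List.pyRange (a-b) (min t (a+b)+1) 2).contains c
                      && (decide (a ≤ c) && decide (b ≤ a)))).map (fun c => [a, b, c]))
      = (PySem.List.pyRange 0 (t+1) 1).flatMap (fun b =>
          if decide (b ≤ a) then
            ((PySem.List.pyRange 0 (t+1) 1).filter
              (fun c => (PySem.List.pyRange (a-b) (min t (a+b)+1) 2).contains c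
                        && decide (a ≤ c))).map (fun c => [a, b, c])
          else []) := by
        refine List.flatMap_congr ?_
        intro b _
        by_cases hba : b ≤ a <;> simp [hba]
    _ = ((PySem.List.pyRange 0 (t+1) 1).filter (fun b => decide (b ≤ a))).flatMap (fun b =>
          ((PySem.List.pyRange 0 (t+1) 1).filter
            (fun c => (PySem.List.pyRange (a-b) (min t (a+b)+1) 2).contains c
                      && decide (a ≤ c))).map (fun c => [a, b, c])) := flatMap_if _ _ _
    _ = (PySem.List.pyRange 0 (a+1) 1).flatMap (fun b =>
          ((PySem.List.pyRange (a-b) (min t (a+b)+1) 2).filter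
            (fun j => decide (a ≤ j))).map (fun c => [a, b, c])) := by
        rw [filter_le_pyRange t a (by omega)]
        refine List.flatMap_congr ?_
        intro b hb
        rw [PySem.List.mem_pyRange_one] at hb
        rw [filter_S3 t a b (by omega) (by omega)]
    _ = (PySem.List.pyRange 0 (a+1) 1).flatMap (fun b =>
          (PySem.List.pyRange (a-b) (min t (a+b)+1) 2).flatMap (fun j =>
            if a ≤ j then [[a, b, j]] else [])) := by
        refine List.flatMap_congr ?_
        intro b _
        rw [flatMap_ite _ (fun j => a ≤ j), ← List.map_eq_flatMap]

lemma case_one (t : Int) :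
    get_bs_subscripts t 1 = get_bs_subscripts_alt t 1 := by
  simp only [get_bs_subscripts, get_bs_subscripts_alt]
  norm_num
  simp only [List.filter_flatMap, List.filter_map, Function.comp_def, pvJF, pvF1, pvFd1]
  refine List.flatMap_congr ?_
  intro a ha
  rw [PySem.List.mem_pyRange_one] at ha
  calc (PySem.List.pyRange 0 (t+1) 1).flatMap (fun b =>
          ((PySem.List.pyRange 0 (t+1) 1).filter
            (fun c => (PySem.List.pyRange (a-b) (min t (a+b)+1) 2).contains c
                      && (decide (a = b) && decide (b ≤ a)))).map (fun c => [a, b, c]))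
      = (PySem.List.pyRange 0 (t+1) 1).flatMap (fun b =>
          if decide (a = b) && decide (b ≤ a) then
            ((PySem.List.pyRange 0 (t+1) 1).filter
              (fun c => (PySem.List.pyRange (a-b) (min t (a+b)+1) 2).contains c)).map
              (fun c => [a, b, c])
          else []) := by
        refine List.flatMap_congr ?_
        intro b _
        by_cases h : a = b
        · subst h; simp
        · simp [h]
    _ = ((PySem.List.pyRange 0 (t+1) 1).filter (fun b => decide (a = b) && decide (b ≤ a))).flatMap
          (fun b => ((PySem.List.pyRange 0 (t+1) 1).filter
            (fun c => (PySem.List.pyRange (a-b) (min t (a+b)+1) 2).contains c)).map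
            (fun c => [a, b, c])) := flatMap_if _ _ _
    _ = ([a] : List Int).flatMap (fun b =>
          ((PySem.List.pyRange 0 (t+1) 1).filter
            (fun c => (PySem.List.pyRange (a-b) (min t (a+b)+1) 2).contains c)).map
            (fun c => [a, b, c])) := by
        rw [filter_key t a _ (fun x => by simp; omega) (by omega) (by omega)]
    _ = (PySem.List.pyRange 0 (min t (a+a) + 1) 2).flatMap (fun j => [[a, a, j]]) := by
        rw [List.flatMap_singleton, filter_S t a a (by omega) (by omega),
          ← List.map_eq_flatMap]
        rw [show a - a = 0 by omega]

lemma case_two (t : Int) :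
    get_bs_subscripts t 2 = get_bs_subscripts_alt t 2 := by
  simp only [get_bs_subscripts, get_bs_subscripts_alt]
  norm_num
  simp only [List.filter_flatMap, List.filter_map, Function.comp_def, pvF1, pvF2]
  rw [List.map_eq_flatMap]
  refine List.flatMap_congr ?_
  intro a ha
  rw [PySem.List.mem_pyRange_one] at ha
  calc (PySem.List.pyRange 0 (t+1) 1).flatMap (fun b =>
          ((PySem.List.pyRange 0 (t+1) 1).filter
            (fun c => decide (a = b) && decide (b = c) && decide (b ≤ a))).map
            (fun c => [a, b, c]))
      = (PySem.List.pyRange 0 (t+1) 1).flatMap (fun b =>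
          if decide (a = b) then
            ((PySem.List.pyRange 0 (t+1) 1).filter (fun c => decide (b = c))).map
              (fun c => [a, b, c])
          else []) := by
        refine List.flatMap_congr ?_
        intro b _
        by_cases h : a = b
        · subst h; simp
        · simp [h]
    _ = ((PySem.List.pyRange 0 (t+1) 1).filter (fun b => decide (a = b))).flatMap (fun b =>
          ((PySem.List.pyRange 0 (t+1) 1).filter (fun c => decide (b = c))).map
            (fun c => [a, b, c])) := flatMap_if _ _ _
    _ = ([a] : List Int).flatMap (fun b =>
          ((PySem.List.pyRange 0 (t+1) 1).filter (fun c => decide (b = c))).map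
            (fun c => [a, b, c])) := by
        rw [filter_key t a _ (fun x => by simp; omega) (by omega) (by omega)]
    _ = [[a, a, a]] := by
        rw [List.flatMap_singleton, filter_key t a _ (fun x => by simp; omega) (by omega) (by omega)]
        rfl

-- ===== VERDICT (by name: the statement is the Claim_ definition above) =====
theorem get_bs_subscripts_spec : Claim_equal_get_bs_subscripts := by
  intro t d _
  unfold Spec_get_bs_subscripts
  by_cases h2 : d = 2
  · subst h2; exact case_two t
  by_cases h1 : d = 1
  · subst h1; exact case_one t
  by_cases h3 : d = 3
  · subst h3; exact case_three t
  exact case_generic t d h2 h1 h3
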